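-- pv_equiv track=rewrite | github.com/Sick-maker/psb-auto-etl | tools/notion_sync_kryptos.py | section_from_ctx
-- ===== SOURCE A (Python) =====
-- def section_from_ctx(ctx_id: str) -> str:
--     if not ctx_id:
--         return ""
--     parts = ctx_id.split("-")
--     for p in parts:
--         if p in ("K1", "K2", "K3", "K4"):
--             return p
--     return ""
-- ===== SOURCE B (Python) =====
-- def section_from_ctx(ctx_id: str) -> str:
--     # One left-to-right scan over token starts; no parts list is built.
--     s = ctx_id
--     n = len(s)
--     i = 0
--     while i < n:
--         if s[i] == 'K' and i + 1 < n and s[i + 1] in '1234' and (i + 2 >= n or s[i + 2] == '-'):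
--             return s[i:i + 2]
--         while i < n and s[i] != '-':
--             i += 1
--         i += 1
--     return ""
-- ===== Notes on version B (the rewrite author's own statement) =====
-- stated objective: alternative
-- what changed: Replaced split('-') plus a scan over the resulting parts list by a single index scan of the raw string that jumps from token start to token start and tests for a delimiter-bounded 'K1'..'K4' in place, so no parts list is ever built.
import Mathlib
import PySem

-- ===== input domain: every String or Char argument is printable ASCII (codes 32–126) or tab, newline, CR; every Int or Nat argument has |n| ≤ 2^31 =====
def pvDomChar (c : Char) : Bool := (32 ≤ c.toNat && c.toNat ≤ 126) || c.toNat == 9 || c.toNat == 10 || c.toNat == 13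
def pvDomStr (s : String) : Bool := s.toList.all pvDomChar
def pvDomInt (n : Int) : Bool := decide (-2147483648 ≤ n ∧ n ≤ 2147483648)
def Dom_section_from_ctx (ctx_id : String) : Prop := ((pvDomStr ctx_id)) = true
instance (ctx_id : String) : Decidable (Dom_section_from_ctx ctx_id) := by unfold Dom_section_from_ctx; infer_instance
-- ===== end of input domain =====

-- B replaces A's split("-")-then-scan with a single left-to-right scan over token starts
-- that never builds the parts list (objective: alternative single-pass decomposition).

-- ===== PORT A =====
-- the for-loop over parts: first part equal to one of "K1".."K4", else ""
def scanParts : List (List Char) → String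
  | [] => ""
  | p :: ps =>
    if p = ['K', '1'] ∨ p = ['K', '2'] ∨ p = ['K', '3'] ∨ p = ['K', '4']
    then String.ofList p else scanParts ps

def section_from_ctx (ctx_id : String) : String :=
  if ctx_id.toList = [] then ""                                   -- `if not ctx_id: return ""`
  else scanParts (PySem.Chars.splitOn ctx_id.toList ['-'])        -- `ctx_id.split("-")`

-- ===== PORT B =====
-- inner while loop of Source B: advance i past the next '-' (to the next token start)
def skipTok : List Char → List Char
  | [] => []
  | c :: cs => if c = '-' then cs else skipTok cs

theorem skipTok_length_le (l : List Char) : (skipTok l).length ≤ l.length := by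
  induction l with
  | nil => simp [skipTok]
  | cons c cs ih => simp only [skipTok]; split <;> simp; omega

-- outer while loop of Source B: at each token start, test for a delimiter-bounded "K1".."K4"
def altGo : List Char → String
  | [] => ""
  | c :: cs =>
    if c = 'K' ∧
        (cs.head? = some '1' ∨ cs.head? = some '2' ∨ cs.head? = some '3' ∨ cs.head? = some '4') ∧
        ((cs.drop 1).head? = none ∨ (cs.drop 1).head? = some '-')
    then String.ofList ((c :: cs).take 2)                         -- `return s[i:i+2]`
    else altGo (skipTok (c :: cs))
  termination_by l => l.length
  decreasing_by
    have h := skipTok_length_le cs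
    simp only [skipTok]
    split <;> simp; omega

def section_from_ctx_alt (ctx_id : String) : String := altGo ctx_id.toList

-- ===== PRECONDITION & SPEC =====
def Spec_section_from_ctx (ctx_id : String) (out : String) : Prop := out = section_from_ctx_alt ctx_id
instance (ctx_id : String) (out : String) : Decidable (Spec_section_from_ctx ctx_id out) := by unfold Spec_section_from_ctx; infer_instance

-- ===== CLAIM (what is proved, stated in full; the proofs are below) =====
def Claim_equal_section_from_ctx : Prop := ∀ (ctx_id : String), Dom_section_from_ctx ctx_id → Spec_section_from_ctx ctx_id (section_from_ctx ctx_id)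

-- ===== LEMMAS AND PROOFS =====

-- reference form of Python's split on the one-character separator '-'
def splitDash : List Char → List (List Char)
  | [] => [[]]
  | c :: cs =>
    if c = '-' then [] :: splitDash cs
    else match splitDash cs with
      | [] => [[c]]
      | t :: ts => (c :: t) :: ts

theorem splitDash_ne_nil (l : List Char) : splitDash l ≠ [] := by
  cases l with
  | nil => simp [splitDash]
  | cons c cs =>
    simp only [splitDash]
    split
    · simp
    · cases h : splitDash cs <;> simp

def mergeFirst (pre : List Char) : List (List Char) → List (List Char)
  | [] => [pre]
  | t :: ts => (pre ++ t) :: ts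

theorem go_eq (fuel : Nat) : ∀ (l cur : List Char) (acc : List (List Char)), l.length < fuel →
    PySem.Chars.splitOn.go ['-'] fuel l cur acc = acc.reverse ++ mergeFirst cur.reverse (splitDash l) := by
  induction fuel with
  | zero => intro l cur acc h; omega
  | succ f ih =>
    intro l cur acc h
    cases l with
    | nil =>
      rw [PySem.Chars.splitOn.go]
      all_goals try omega
      simp [splitDash, mergeFirst]
    | cons c rest =>
      rw [PySem.Chars.splitOn.go]
      by_cases hc : c = '-'
      · subst hc
        simp only [List.isPrefixOf, beq_self_eq_true, Bool.true_and, if_pos,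
          List.length_singleton, List.drop_succ_cons, List.drop_zero]
        rw [ih rest [] (cur.reverse :: acc) (by simp at h ⊢; omega)]
        obtain ⟨t, ts, hts⟩ : ∃ t ts, splitDash rest = t :: ts := by
          cases hh : splitDash rest with
          | nil => exact absurd hh (splitDash_ne_nil rest)
          | cons t ts => exact ⟨t, ts, rfl⟩
        simp [splitDash, mergeFirst, hts]
      · have hpf : ['-'].isPrefixOf (c :: rest) = false := by
          simp [List.isPrefixOf]; exact fun h' => absurd h'.symm hc
        rw [hpf]
        simp only [Bool.false_eq_true, if_neg, not_false_eq_true]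
        rw [ih rest (c :: cur) acc (by simp at h ⊢; omega)]
        obtain ⟨t, ts, hts⟩ : ∃ t ts, splitDash rest = t :: ts := by
          cases hh : splitDash rest with
          | nil => exact absurd hh (splitDash_ne_nil rest)
          | cons t ts => exact ⟨t, ts, rfl⟩
        simp [splitDash, hc, hts, mergeFirst]

theorem splitOn_eq (cs : List Char) : PySem.Chars.splitOn cs ['-'] = splitDash cs := by
  unfold PySem.Chars.splitOn
  rw [go_eq (cs.length + 1) cs [] [] (by omega)]
  obtain ⟨t, ts, hts⟩ : ∃ t ts, splitDash cs = t :: ts := by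
    cases hh : splitDash cs with
    | nil => exact absurd hh (splitDash_ne_nil cs)
    | cons t ts => exact ⟨t, ts, rfl⟩
  simp [hts, mergeFirst]

theorem splitDash_head (r : List Char) :
    (splitDash r).head? = some (r.takeWhile (fun x => x ≠ '-')) := by
  induction r with
  | nil => simp [splitDash]
  | cons c cs ih =>
    simp only [splitDash]
    by_cases hc : c = '-'
    · simp [hc, List.takeWhile]
    · cases hh : splitDash cs with
      | nil => exact absurd hh (splitDash_ne_nil cs)
      | cons t ts =>
        rw [hh] at ih
        simp only [List.head?] at ih
        simp [hc, List.takeWhile, Option.some.injEq] at ih ⊢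
        exact ih

-- B's delimiter-bounded test equals "first token of c::r is exactly Kd"
theorem cond_iff (c : Char) (r : List Char) :
    ((c :: r.takeWhile (fun x => x ≠ '-') = ['K', '1'] ∨ c :: r.takeWhile (fun x => x ≠ '-') = ['K', '2'] ∨
      c :: r.takeWhile (fun x => x ≠ '-') = ['K', '3'] ∨ c :: r.takeWhile (fun x => x ≠ '-') = ['K', '4'])) ↔
    (c = 'K' ∧
      (r.head? = some '1' ∨ r.head? = some '2' ∨ r.head? = some '3' ∨ r.head? = some '4') ∧
      ((r.drop 1).head? = none ∨ (r.drop 1).head? = some '-')) := by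
  rcases r with _ | ⟨d, _ | ⟨e, r3⟩⟩
  · simp [List.takeWhile]
  · by_cases hd : d = '-'
    · subst hd; simp [List.takeWhile]
    · simp [List.takeWhile, hd]
      constructor
      · rintro (⟨hc, h1⟩ | ⟨hc, h1⟩ | ⟨hc, h1⟩ | ⟨hc, h1⟩) <;> subst h1 <;> simp [hc]
      · rintro ⟨hc, h1 | h1 | h1 | h1⟩ <;> subst h1 <;> simp [hc]
  · by_cases hd : d = '-'
    · subst hd; simp [List.takeWhile]
    · by_cases he : e = '-'
      · subst he
        simp [List.takeWhile, hd]
        constructor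
        · rintro (⟨hc, h1⟩ | ⟨hc, h1⟩ | ⟨hc, h1⟩ | ⟨hc, h1⟩) <;> subst h1 <;> simp [hc]
        · rintro ⟨hc, h1 | h1 | h1 | h1⟩ <;> subst h1 <;> simp [hc]
      · simp [List.takeWhile, hd, he]

-- combined induction: A's scan over the parts of l equals B's scan over l
--   (second conjunct: A's scan over the REMAINING parts equals B restarted past the next '-')
theorem both_scans (n : Nat) : ∀ l : List Char, l.length ≤ n →
    scanParts (splitDash l) = altGo l ∧ scanParts (splitDash l).tail = altGo (skipTok l) := by
  induction n with
  | zero =>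
    intro l hl
    have : l = [] := by cases l <;> simp_all
    subst this
    simp [splitDash, scanParts, altGo, skipTok]
  | succ n ih =>
    intro l hl
    cases l with
    | nil => simp [splitDash, scanParts, altGo, skipTok]
    | cons c r =>
      have hr : r.length ≤ n := by simp at hl; omega
      have hskip : (skipTok r).length ≤ n := le_trans (skipTok_length_le r) hr
      constructor
      · by_cases hc : c = '-'
        · subst hc
          rw [altGo]
          rw [if_neg (by rintro ⟨h, -⟩; exact absurd h (by decide))]
          simp only [splitDash, skipTok, reduceIte, scanParts]
          rw [if_neg (by simp)]
          exact (ih r hr).1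
        · obtain ⟨t, ts, hts⟩ : ∃ t ts, splitDash r = t :: ts := by
            cases hh : splitDash r with
            | nil => exact absurd hh (splitDash_ne_nil r)
            | cons t ts => exact ⟨t, ts, rfl⟩
          have htw : t = r.takeWhile (fun x => x ≠ '-') := by
            have := splitDash_head r
            rw [hts] at this; simpa using this
          rw [altGo]
          simp only [splitDash, if_neg hc, hts, scanParts]
          have hcond := cond_iff c r
          rw [htw] at hts ⊢
          by_cases hhit : c = 'K' ∧
              (r.head? = some '1' ∨ r.head? = some '2' ∨ r.head? = some '3' ∨ r.head? = some '4') ∧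
              ((r.drop 1).head? = none ∨ (r.drop 1).head? = some '-')
          · rw [if_pos (hcond.mpr hhit), if_pos hhit]
            obtain ⟨hcK, hd, hb⟩ := hhit
            obtain ⟨d, r2, rfl⟩ : ∃ d r2, r = d :: r2 := by
              cases r with
              | nil => simp at hd
              | cons d r2 => exact ⟨d, r2, rfl⟩
            have hdn : d ≠ '-' := by
              rcases hd with h | h | h | h <;> simp at h <;> subst h <;> decide
            simp [List.takeWhile, hdn, hcK]
            rcases hb with h | h
            · have : r2 = [] := by cases r2 <;> simp_all
              simp [this]
            · obtain ⟨e, r3, rfl⟩ : ∃ e r3, r2 = e :: r3 := by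
                cases r2 with
                | nil => simp at h
                | cons e r3 => exact ⟨e, r3, rfl⟩
              simp at h
              simp [List.takeWhile, h]
          · rw [if_neg (fun hh => hhit (hcond.mp hh)), if_neg hhit]
            simp only [skipTok, if_neg hc]
            have := (ih r hr).2
            rw [hts] at this
            simpa using this
      · -- tail claim for c :: r
        by_cases hc : c = '-'
        · subst hc
          simp only [splitDash, skipTok, reduceIte, List.tail_cons]
          exact (ih r hr).1
        · obtain ⟨t, ts, hts⟩ : ∃ t ts, splitDash r = t :: ts := by
            cases hh : splitDash r with
            | nil => exact absurd hh (splitDash_ne_nil r)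
            | cons t ts => exact ⟨t, ts, rfl⟩
          simp only [splitDash, if_neg hc, hts, List.tail_cons, skipTok]
          have := (ih r hr).2
          rw [hts] at this
          simpa using this

-- ===== VERDICT (by name: the statement is the Claim_ definition above) =====
theorem section_from_ctx_spec : Claim_equal_section_from_ctx := by
  intro ctx_id _
  unfold Spec_section_from_ctx section_from_ctx section_from_ctx_alt
  by_cases h : ctx_id.toList = []
  · rw [if_pos h, h, altGo]
  · rw [if_neg h, splitOn_eq]
    exact (both_scans ctx_id.toList.length ctx_id.toList le_rfl).1
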